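-- pv_equiv track=rewrite | github.com/Snehasish001/lapp_crawler | singapore_crawler.py | slots_to_crawl
-- ===== SOURCE A (Python) =====
-- TIME_ORDER = [
--     ("12.30", "mor"),
--     ("16.30", "day"),
--     ("20.30", "evn"),
-- ]
--
-- def slots_to_crawl(db, current_slot):
--     result = []
--     for _, slot in TIME_ORDER:
--         if db.get(slot) == "-":
--             result.append(slot)
--         if slot == current_slot:
--             break
--     return result
-- ===== SOURCE B (Python) =====
-- TIME_ORDER = [
--     ("12.30", "mor"),
--     ("16.30", "day"),
--     ("20.30", "evn"),
-- ]
--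
-- # Precomputed: each slot name -> the inclusive prefix of slot names ending at it.
-- _PREFIX = {slot: [s for _, s in TIME_ORDER[: i + 1]] for i, (_, slot) in enumerate(TIME_ORDER)}
-- _ALL = [s for _, s in TIME_ORDER]
--
-- def slots_to_crawl(db, current_slot):
--     return [s for s in _PREFIX.get(current_slot, _ALL) if db.get(s) == "-"]
-- ===== Notes on version B (the rewrite author's own statement) =====
-- stated objective: alternative
-- what changed: B replaces A's runtime scan-with-inclusive-break by a table precomputed once from TIME_ORDER (slot name -> its inclusive prefix of slot names, whole list when the name is absent): the cutoff is found by a single dict lookup, and the result is a filter of that prefix.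
import Mathlib
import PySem

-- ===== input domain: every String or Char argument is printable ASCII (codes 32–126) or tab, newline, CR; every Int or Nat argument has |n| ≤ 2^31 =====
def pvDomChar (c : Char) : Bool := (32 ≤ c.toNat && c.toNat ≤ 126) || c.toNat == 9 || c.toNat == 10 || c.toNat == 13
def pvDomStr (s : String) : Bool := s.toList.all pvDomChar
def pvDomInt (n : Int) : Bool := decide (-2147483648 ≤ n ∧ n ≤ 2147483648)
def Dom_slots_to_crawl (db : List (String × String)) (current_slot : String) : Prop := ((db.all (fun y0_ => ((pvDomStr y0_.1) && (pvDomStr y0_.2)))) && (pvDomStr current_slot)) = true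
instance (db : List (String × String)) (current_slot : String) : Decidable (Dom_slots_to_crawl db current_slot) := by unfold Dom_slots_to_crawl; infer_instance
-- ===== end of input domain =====

-- B replaces A's runtime break-loop by a table precomputed once from TIME_ORDER (slot name -> inclusive prefix), looked up then filtered; alternative decomposition, same values.


-- ===== PORT A =====
def pvTimeOrder : List (String × String) := [("12.30", "mor"), ("16.30", "day"), ("20.30", "evn")]

-- A's loop: append when db.get(slot) == "-", break (inclusively) when slot == current_slot
def pvALoop (db : PySem.Dict String String) (cur : String) : List (String × String) → List String
  | [] => []
  | (_, slot) :: rest =>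
    let r := if PySem.Dict.get? db slot = some "-" then [slot] else []
    if slot = cur then r else r ++ pvALoop db cur rest

def slots_to_crawl (db : List (String × String)) (current_slot : String) : List String :=
  pvALoop (PySem.Dict.mk db) current_slot pvTimeOrder

-- ===== PORT B =====
-- module-level precomputation in Source B: _PREFIX = {slot: names of TIME_ORDER[:i+1]} built by comprehension, _ALL = all names
def pvPrefix : PySem.Dict String (List String) :=
  PySem.Dict.ofList ((PySem.List.enumerate pvTimeOrder).map
    (fun ip => (ip.2.2, (PySem.List.slice pvTimeOrder none (some (ip.1 + 1))).map (fun p => p.2))))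

def pvAll : List String := pvTimeOrder.map (fun p => p.2)

def slots_to_crawl_alt (db : List (String × String)) (current_slot : String) : List String :=
  (PySem.Dict.getD pvPrefix current_slot pvAll).filter
    (fun s => PySem.Dict.get? (PySem.Dict.mk db) s = some "-")

-- ===== PRECONDITION & SPEC =====
def Spec_slots_to_crawl (db : List (String × String)) (current_slot : String) (out : List String) : Prop := out = slots_to_crawl_alt db current_slot
instance (db : List (String × String)) (current_slot : String) (out : List String) : Decidable (Spec_slots_to_crawl db current_slot out) := by unfold Spec_slots_to_crawl; infer_instance

-- ===== CLAIM (what is proved, stated in full; the proofs are below) =====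
def Claim_equal_slots_to_crawl : Prop := ∀ (db : List (String × String)) (current_slot : String), Dom_slots_to_crawl db current_slot → Spec_slots_to_crawl db current_slot (slots_to_crawl db current_slot)

-- ===== LEMMAS AND PROOFS =====

-- ===== VERDICT (by name: the statement is the Claim_ definition above) =====
theorem slots_to_crawl_spec : Claim_equal_slots_to_crawl := by
  intro db cur _
  unfold Spec_slots_to_crawl slots_to_crawl slots_to_crawl_alt
  by_cases h1 : cur = "mor"
  · subst h1
    rw [show PySem.Dict.getD pvPrefix "mor" pvAll = ["mor"] from by decide]
    simp only [pvTimeOrder, pvALoop, List.filter]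
    split_ifs <;> simp_all
  by_cases h2 : cur = "day"
  · subst h2
    rw [show PySem.Dict.getD pvPrefix "day" pvAll = ["mor", "day"] from by decide]
    simp only [pvTimeOrder, pvALoop, List.filter]
    split_ifs <;> simp_all
  by_cases h3 : cur = "evn"
  · subst h3
    rw [show PySem.Dict.getD pvPrefix "evn" pvAll = ["mor", "day", "evn"] from by decide]
    simp only [pvTimeOrder, pvALoop, List.filter]
    split_ifs <;> simp_all
  · have h1' : "mor" ≠ cur := fun h => h1 h.symm
    have h2' : "day" ≠ cur := fun h => h2 h.symm
    have h3' : "evn" ≠ cur := fun h => h3 h.symm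
    rw [show PySem.Dict.getD pvPrefix cur pvAll = ["mor", "day", "evn"] from by
      simp [pvPrefix, PySem.Dict.getD, PySem.Dict.get?, PySem.Dict.ofList, pvAll, pvTimeOrder,
        PySem.List.enumerate, PySem.List.slice, PySem.Dict.update, PySem.Dict.insert,
        PySem.Dict.items, PySem.Dict.empty, List.find?_cons, h1', h2', h3']]
    simp only [pvTimeOrder, pvALoop, List.filter]
    norm_num [h1, h2, h3]
    split_ifs <;> simp_all
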